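-- pv_equiv track=rewrite | github.com/adolphofigueiredo/ERP-SoftwareDeveloper | Python/Italiano/20240507_Esercizio_03_01.py | Classificazione
-- ===== SOURCE A (Python) =====
-- def Classificazione(N , Lista , NumLimite):                                     #
--     '''
-- Funzione: Classificazione
-- Funzione creata per contare quanti numeri sono maggiori, minori e uguali al numero limite.
--
-- Parametri formali:
-- N --> Numero di elemento della lista.
-- Lista --> Variabile creata per memorizzare la lista.
-- NumLimite --> Variabile creata per memorizzare il numero limite.
--
-- Valore di ritorno:
-- Maggiore --> Contatore creato per contare quanti numeri sono maggiori del numero limite.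
-- Minore --> Contatore creato per contare quanti numeri sono minori del numero limite.
-- Uguale --> Contatore creato per contare quanti numeri sono uguali del numero limite.
--     '''
--     #Parametri formali:
--     Maggiore = 0
--     Minore = 0
--     Uguale = 0
--     for x in range (N):                                    #
--         if Lista[x] == NumLimite:                          #
--             Uguale += 1
--         elif Lista[x] < NumLimite:                         #
--             Minore += 1
--         else:                                              #
--             Maggiore += 1
--     #Valore di ritorno:
--     return Maggiore, Minore, Uguale                        #
-- ===== SOURCE B (Python) =====
-- def Classificazione(N, Lista, NumLimite):
--     prefix = Lista[:N] if N > 0 else []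
--     Uguale = prefix.count(NumLimite)
--     Minore = sum(1 for v in prefix if v < NumLimite)
--     return len(prefix) - Uguale - Minore, Minore, Uguale
-- ===== Notes on version B (the rewrite author's own statement) =====
-- stated objective: simpler
-- what changed: Replace the index loop with three explicit branches by a slice of the first N elements plus library counting (count for equals, a generator sum for smaller) and derive the greater count by subtraction from the prefix length.
-- outside the precondition, e.g. on Classificazione(3, [1, 2], 5): A raises IndexError, B returns (0, 2, 0)
import Mathlib
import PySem

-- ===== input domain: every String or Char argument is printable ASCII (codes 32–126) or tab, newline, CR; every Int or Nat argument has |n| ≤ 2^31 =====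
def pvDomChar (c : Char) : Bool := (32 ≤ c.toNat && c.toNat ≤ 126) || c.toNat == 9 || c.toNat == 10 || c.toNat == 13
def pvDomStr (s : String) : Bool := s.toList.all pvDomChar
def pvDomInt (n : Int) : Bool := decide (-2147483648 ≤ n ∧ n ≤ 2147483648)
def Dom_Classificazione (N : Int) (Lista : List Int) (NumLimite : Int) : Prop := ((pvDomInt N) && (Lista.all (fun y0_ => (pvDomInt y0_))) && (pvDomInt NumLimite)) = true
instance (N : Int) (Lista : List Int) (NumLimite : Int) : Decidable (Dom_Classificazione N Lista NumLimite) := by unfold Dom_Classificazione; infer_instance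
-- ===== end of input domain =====

-- B replaces A's three-branch index loop by slice + library counting (count / filtered sum),
-- deriving the 'greater' count by subtraction from the pref length; objective: simpler.


-- ===== PORT A =====
-- for x in range(N): Lista[x] compared against NumLimite with three counters.
-- pyGetD is sound here because Pre_ keeps every index of range(N) in range.
def Classificazione (N : Int) (Lista : List Int) (NumLimite : Int) : Int × Int × Int :=
  (PySem.List.pyRange 0 N 1).foldl
    (fun s x =>
      if PySem.List.pyGetD Lista x 0 == NumLimite then (s.1, s.2.1, s.2.2 + 1)
      else if PySem.List.pyGetD Lista x 0 < NumLimite then (s.1, s.2.1 + 1, s.2.2)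
      else (s.1 + 1, s.2.1, s.2.2))
    (0, 0, 0)

-- ===== PORT B =====
-- pref = Lista[:N] if N > 0 else []; count equals, sum of 1 per smaller, greater by subtraction.
def Classificazione_alt (N : Int) (Lista : List Int) (NumLimite : Int) : Int × Int × Int :=
  let pref := if N > 0 then PySem.List.slice Lista none (some N) else []
  let uguale : Int := (PySem.List.count pref NumLimite : Int)
  let minore : Int := (pref.countP (fun v => decide (v < NumLimite)) : Int)
  ((pref.length : Int) - uguale - minore, minore, uguale)

-- ===== PRECONDITION & SPEC =====
-- Pre_ excludes exactly the inputs where A raises IndexError: N beyond the end of Lista.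
def Pre_Classificazione (N : Int) (Lista : List Int) (NumLimite : Int) : Prop :=
  N ≤ (Lista.length : Int)
instance (N : Int) (Lista : List Int) (NumLimite : Int) : Decidable (Pre_Classificazione N Lista NumLimite) := by unfold Pre_Classificazione; infer_instance

def pvWitness_Classificazione : Int × List Int × Int := (3, [1, 5, 2, 7], 4)

def Spec_Classificazione (N : Int) (Lista : List Int) (NumLimite : Int) (out : Int × Int × Int) : Prop := out = Classificazione_alt N Lista NumLimite
instance (N : Int) (Lista : List Int) (NumLimite : Int) (out : Int × Int × Int) : Decidable (Spec_Classificazione N Lista NumLimite out) := by unfold Spec_Classificazione; infer_instance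

-- ===== CLAIM (what is proved, stated in full; the proofs are below) =====
def Claim_equal_Classificazione : Prop := ∀ (N : Int) (Lista : List Int) (NumLimite : Int), Dom_Classificazione N Lista NumLimite → Pre_Classificazione N Lista NumLimite → Spec_Classificazione N Lista NumLimite (Classificazione N Lista NumLimite)

-- ===== LEMMAS AND PROOFS =====

-- A's loop over a whole list, started at (a,b,c), adds the three counts componentwise.
lemma fold_counts (m : Int) (p : List Int) : ∀ (a b c : Int),
    p.foldl
      (fun s v =>
        if v == m then (s.1, s.2.1, s.2.2 + 1)
        else if v < m then (s.1, s.2.1 + 1, s.2.2)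
        else (s.1 + 1, s.2.1, s.2.2))
      (a, b, c)
    = (a + ((p.length : Int) - (List.count m p : Int) - (p.countP (fun v => decide (v < m)) : Int)),
       b + (p.countP (fun v => decide (v < m)) : Int),
       c + (List.count m p : Int)) := by
  induction p with
  | nil => intro a b c; simp
  | cons x p ih =>
    intro a b c
    simp only [List.foldl_cons, List.count_cons, List.countP_cons, List.length_cons]
    by_cases hx : x = m
    · subst hx
      simp only [BEq.rfl, if_true, lt_irrefl, decide_false]
      rw [ih]
      push_cast
      refine Prod.ext ?_ (Prod.ext ?_ ?_) <;> simp <;> ring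
    · have hne : (x == m) = false := by simp [hx]
      simp only [hne, if_false, Bool.false_eq_true]
      by_cases hlt : x < m
      · simp only [hlt, if_true, decide_true]
        rw [ih]
        push_cast
        refine Prod.ext ?_ (Prod.ext ?_ ?_) <;> simp <;> ring
      · simp only [hlt, if_false, decide_false]
        rw [ih]
        push_cast
        refine Prod.ext ?_ (Prod.ext ?_ ?_) <;> simp <;> ring

-- ===== VERDICT (by name: the statement is the Claim_ definition above) =====
theorem Classificazione_spec : Claim_equal_Classificazione := by
  intro N Lista NumLimite _ hpre
  unfold Spec_Classificazione Classificazione Classificazione_alt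
  by_cases hN : 0 < N
  · have hNit : N = ((N.toNat : Nat) : Int) := by omega
    set p : List Int := Lista.take N.toNat with hp
    have hlenp : p.length = N.toNat := by
      rw [hp, List.length_take]; unfold Pre_Classificazione at hpre; omega
    have hslice : PySem.List.slice Lista none (some N) = p := by
      rw [PySem.List.slice_to Lista (le_of_lt hN), hp]
    have hlen' : PySem.List.len p = N := by
      simp [PySem.List.len, hlenp]; omega
    have hrange : PySem.List.pyRange 0 N 1 = PySem.List.pyRange 0 (PySem.List.len p) 1 := by
      rw [hlen']
    rw [hrange]
    have hcongr :
        (PySem.List.pyRange 0 (PySem.List.len p) 1).foldl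
          (fun s x =>
            if PySem.List.pyGetD Lista x 0 == NumLimite then (s.1, s.2.1, s.2.2 + 1)
            else if PySem.List.pyGetD Lista x 0 < NumLimite then (s.1, s.2.1 + 1, s.2.2)
            else (s.1 + 1, s.2.1, s.2.2))
          ((0 : Int), (0 : Int), (0 : Int))
        = (PySem.List.pyRange 0 (PySem.List.len p) 1).foldl
          (fun s x =>
            if PySem.List.pyGetD p x 0 == NumLimite then (s.1, s.2.1, s.2.2 + 1)
            else if PySem.List.pyGetD p x 0 < NumLimite then (s.1, s.2.1 + 1, s.2.2)
            else (s.1 + 1, s.2.1, s.2.2))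
          ((0 : Int), (0 : Int), (0 : Int)) := by
      apply PySem.List.foldl_congr_mem
      intro acc x hx
      have hx' := (PySem.List.mem_pyRange_one).1 hx
      have h0 : 0 ≤ x := hx'.1
      have h1 : x < (p.length : Int) := by
        have := hx'.2; simpa [PySem.List.len] using this
      have h1' : x < (Lista.length : Int) := by
        unfold Pre_Classificazione at hpre; omega
      have hg : PySem.List.pyGetD Lista x 0 = PySem.List.pyGetD p x 0 := by
        rw [PySem.List.pyGetD_eq_getElem Lista 0 h0 h1',
            PySem.List.pyGetD_eq_getElem p 0 h0 h1]
        simp [hp, List.getElem_take]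
      rw [hg]
    rw [hcongr,
        PySem.List.foldl_pyRange_zero_pyGetD p 0
          (fun (s : Int × Int × Int) v =>
            if v == NumLimite then (s.1, s.2.1, s.2.2 + 1)
            else if v < NumLimite then (s.1, s.2.1 + 1, s.2.2)
            else (s.1 + 1, s.2.1, s.2.2))
          ((0 : Int), (0 : Int), (0 : Int)),
        fold_counts]
    simp [hN, hslice, PySem.List.count_eq]
  · have h1 : PySem.List.pyRange 0 N 1 = [] := PySem.List.pyRange_one_eq_nil (by omega)
    simp [h1, hN]
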